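-- pv_equiv track=rewrite | github.com/onedayxzn/API-Book | soal/test.py | kata_terpanjang
-- ===== SOURCE A (Python) =====
-- def kata_terpanjang(kalimat):
--
--     kata_kata = kalimat.split()  # Pisahkan kalimat menjadi list kata-kata
--     panjang_maks = 0
--     kata_terpanjang = ""
--
--     for kata in kata_kata:
--         if len(kata) > panjang_maks:
--             panjang_maks = len(kata)
--             kata_terpanjang = kata
--
--     return kata_terpanjang
-- ===== SOURCE B (Python) =====
-- def kata_terpanjang(kalimat):
--     kata_kata = kalimat.split()
--     if not kata_kata:
--         return ""
--     return sorted(kata_kata, key=lambda w: -len(w))[0]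
-- ===== Notes on version B (the rewrite author's own statement) =====
-- stated objective: alternative
-- what changed: Replaces the manual max-tracking loop with a stable sort by descending word length and taking the first element (stability preserves A's first-longest tie-break).
import Mathlib
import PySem

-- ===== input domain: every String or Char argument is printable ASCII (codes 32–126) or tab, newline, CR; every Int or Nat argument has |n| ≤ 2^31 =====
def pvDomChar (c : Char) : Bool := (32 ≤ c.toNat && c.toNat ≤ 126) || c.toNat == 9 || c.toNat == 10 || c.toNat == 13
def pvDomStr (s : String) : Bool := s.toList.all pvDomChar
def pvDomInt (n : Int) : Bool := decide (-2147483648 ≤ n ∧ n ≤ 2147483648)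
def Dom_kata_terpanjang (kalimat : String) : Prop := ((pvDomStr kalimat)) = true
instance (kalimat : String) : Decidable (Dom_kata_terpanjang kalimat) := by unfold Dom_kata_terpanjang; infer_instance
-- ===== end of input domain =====

-- ===== PORT A =====
-- B picks the first longest word via a stable sort by descending length instead of A's running-max loop; same return value.
def kata_terpanjang (kalimat : String) : String :=
  let kata_kata := PySem.Str.split₀ kalimat
  let st := kata_kata.foldl
    (fun (st : Int × String) kata =>
      if PySem.Str.len kata > st.1 then (PySem.Str.len kata, kata) else st)
    (0, "")
  st.2

-- ===== PORT B =====
def kata_terpanjang_alt (kalimat : String) : String :=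
  let kata_kata := PySem.Str.split₀ kalimat
  if kata_kata.isEmpty then ""
  else (PySem.List.sorted kata_kata (fun w => -(PySem.Str.len w)) false).headI

-- ===== PRECONDITION & SPEC =====
def Spec_kata_terpanjang (kalimat : String) (out : String) : Prop := out = kata_terpanjang_alt kalimat
instance (kalimat : String) (out : String) : Decidable (Spec_kata_terpanjang kalimat out) := by unfold Spec_kata_terpanjang; infer_instance

-- ===== CLAIM (what is proved, stated in full; the proofs are below) =====
def Claim_equal_kata_terpanjang : Prop := ∀ (kalimat : String), Dom_kata_terpanjang kalimat → Spec_kata_terpanjang kalimat (kata_terpanjang kalimat)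

-- ===== LEMMAS AND PROOFS =====

-- the scalar first-longest fold both sides reduce to
def pvBest (b : String) (ws : List String) : String :=
  ws.foldl (fun best x => if PySem.Str.len x > PySem.Str.len best then x else best) b

-- A's pair fold tracks (len best, best)
lemma pvBest_cons (b x : String) (ws : List String) :
    pvBest b (x :: ws)
      = pvBest (if PySem.Str.len x > PySem.Str.len b then x else b) ws := rfl

lemma pairFold_eq (ws : List String) (b : String) :
    ws.foldl (fun (st : Int × String) kata =>
        if PySem.Str.len kata > st.1 then (PySem.Str.len kata, kata) else st)
      (PySem.Str.len b, b) = (PySem.Str.len (pvBest b ws), pvBest b ws) := by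
  induction ws generalizing b with
  | nil => rfl
  | cons x ws ih =>
      simp only [List.foldl_cons]
      rw [pvBest_cons]
      by_cases h : PySem.Str.len x > PySem.Str.len b
      · rw [if_pos h, if_pos h]; exact ih x
      · rw [if_neg h, if_neg h]; exact ih b

lemma len_zero_eq_empty (s : String) (h : PySem.Str.len s = 0) : s = "" := by
  have : s.toList.length = 0 := by
    have := PySem.Str.len_eq s
    omega
  have : s.toList = [] := List.eq_nil_of_length_eq_zero this
  have h2 : s.toList = ("" : String).toList := this
  exact String.toList_inj.mp h2

-- the head of the insertion-sort fold is the first-longest fold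
lemma head_insert_fold (ws : List String) (h : String) (t : List String) :
    ∃ t', ws.foldl
        (fun acc x => PySem.List.insertBy
          (fun a b => decide ((fun w => -(PySem.Str.len w)) a < (fun w => -(PySem.Str.len w)) b)) x acc)
        (h :: t) = pvBest h ws :: t' := by
  induction ws generalizing h t with
  | nil => exact ⟨t, rfl⟩
  | cons x ws ih =>
      simp only [List.foldl_cons]
      rw [pvBest_cons]
      by_cases hx : PySem.Str.len x > PySem.Str.len h
      · have hc : (-(PySem.Str.len x) < -(PySem.Str.len h)) := by omega
        simp only [PySem.List.insertBy, hc, decide_true, if_pos]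
        rw [if_pos hx]
        exact ih x (h :: t)
      · have hc : ¬ (-(PySem.Str.len x) < -(PySem.Str.len h)) := by omega
        simp only [PySem.List.insertBy, hc, decide_false, Bool.false_eq_true, if_false]
        rw [if_neg hx]
        exact ih h _

-- ===== VERDICT (by name: the statement is the Claim_ definition above) =====
theorem kata_terpanjang_spec : Claim_equal_kata_terpanjang := by
  intro kalimat _
  unfold Spec_kata_terpanjang kata_terpanjang kata_terpanjang_alt
  cases hws : PySem.Str.split₀ kalimat with
  | nil => simp
  | cons w ws =>
      simp only [List.isEmpty_cons, if_neg, Bool.false_eq_true, not_false_eq_true]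
      -- A side: the first step absorbs the (0, "") seed
      have hA : (w :: ws).foldl
          (fun (st : Int × String) kata =>
            if PySem.Str.len kata > st.1 then (PySem.Str.len kata, kata) else st)
          (0, "") = (PySem.Str.len (pvBest w ws), pvBest w ws) := by
        have hseed : ((0 : Int), "") = (PySem.Str.len "", "") := by decide
        rw [List.foldl_cons]
        by_cases hw : PySem.Str.len w > 0
        · rw [if_pos hw]; exact pairFold_eq ws w
        · have hw0 : PySem.Str.len w = 0 := by
            have := PySem.Str.len_eq w; omega
          have hwe : w = "" := len_zero_eq_empty w hw0
          rw [if_neg hw, hseed, pairFold_eq ws ""]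
          rw [hwe]
      -- B side: sorted = foldl insertBy starting from [w]
      have hB := head_insert_fold ws w []
      obtain ⟨t', ht'⟩ := hB
      have hsorted : PySem.List.sorted (w :: ws) (fun w => -(PySem.Str.len w)) false
          = pvBest w ws :: t' := by
        rw [PySem.List.sorted_eq_foldl_insertBy]
        simpa using ht'
      rw [hA, hsorted]
      rfl
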